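-- pv_equiv track=rewrite | github.com/basceranov/dr4g0nc3ll0 | main.py | _pack_docs_for_llm
-- ===== SOURCE A (Python) =====
-- from typing import List, Dict, Optional, Tuple
--
-- def _clip(s: str, n: int) -> str:
--     s = (s or "").strip()
--     return s[:n] + ("…" if len(s) > n else "")
--
-- def _pack_docs_for_llm(docs: List[Dict], hard_limit: int = 12000) -> str:
--     """Confeziona un contesto testuale compatto per l'LLM (title + snippet testo)."""
--     buf, total = [], 0
--     for d in docs:
--         block = "# " + (d.get("title","") or "") + "\n" + _clip(d.get("text",""), 3500) + "\n\n"
--         if total + len(block) > hard_limit: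
--             break
--         buf.append(block)
--         total += len(block)
--     return "".join(buf)
-- ===== SOURCE B (Python) =====
-- from typing import List, Dict, Optional, Tuple
--
-- def _clip(s: str, n: int) -> str:
--     s = (s or "").strip()
--     return s[:n] + ("\u2026" if len(s) > n else "")
--
-- def _pack_docs_for_llm(docs: List[Dict], hard_limit: int = 12000) -> str:
--     # build-then-cut: all blocks first, then prefix sums, then one slice
--     blocks = ["# " + (d.get("title", "") or "") + "\n" + _clip(d.get("text", ""), 3500) + "\n\n"
--               for d in docs]
--     cums, t = [], 0
--     for b in blocks:
--         t += len(b)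
--         cums.append(t)
--     cut = sum(1 for c in cums if c <= hard_limit)
--     return "".join(blocks[:cut])
-- ===== Notes on version B (the rewrite author's own statement) =====
-- stated objective: alternative
-- what changed: A's single incremental loop with break and running total is replaced by a build-then-cut decomposition: first all blocks via a comprehension, then prefix sums of their lengths, then a count of cumulative sums <= hard_limit and one join of that leading slice.
import Mathlib
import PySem

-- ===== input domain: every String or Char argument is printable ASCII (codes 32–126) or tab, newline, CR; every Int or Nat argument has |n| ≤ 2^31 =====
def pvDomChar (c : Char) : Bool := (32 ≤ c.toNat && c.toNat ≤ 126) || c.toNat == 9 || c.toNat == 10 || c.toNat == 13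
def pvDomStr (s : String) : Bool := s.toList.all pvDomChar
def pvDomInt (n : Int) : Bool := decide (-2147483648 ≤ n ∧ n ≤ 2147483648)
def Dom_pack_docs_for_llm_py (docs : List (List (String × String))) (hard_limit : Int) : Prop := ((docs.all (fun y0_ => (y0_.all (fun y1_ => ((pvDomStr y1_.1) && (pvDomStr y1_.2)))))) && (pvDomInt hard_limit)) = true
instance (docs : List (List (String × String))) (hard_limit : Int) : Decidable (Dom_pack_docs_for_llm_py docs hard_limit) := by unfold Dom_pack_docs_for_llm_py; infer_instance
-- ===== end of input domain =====

-- B replaces A's incremental break-loop by build-all-blocks, prefix-sum, count-and-slice (objective: alternative decomposition).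

-- ===== PORT A =====
-- _clip: s = (s or "").strip(); return s[:n] + ("…" if len(s) > n else "")
-- ('s or ""' is the identity on strings: '' stays '')
def pvClip (s : String) (n : Int) : String :=
  let s2 := PySem.Str.strip s
  PySem.Str.slice s2 none (some n) ++ (if PySem.Str.len s2 > n then "…" else "")

-- block = "# " + (d.get("title","") or "") + "\n" + _clip(d.get("text",""), 3500) + "\n\n"
def pvBlock (d : List (String × String)) : String :=
  let dd := PySem.Dict.mk d
  let title := dd.getD "title" ""
  "# " ++ (if title == "" then "" else title) ++ "\n" ++ pvClip (dd.getD "text" "") 3500 ++ "\n\n"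

-- A's loop: accumulate blocks while total + len(block) ≤ hard_limit, break at the first overflow
def pvPackLoop (hard_limit : Int) : List (List (String × String)) → Int → List String
  | [], _ => []
  | d :: rest, total =>
    let block := pvBlock d
    if total + PySem.Str.len block > hard_limit then []
    else block :: pvPackLoop hard_limit rest (total + PySem.Str.len block)

def pack_docs_for_llm_py (docs : List (List (String × String))) (hard_limit : Int) : String :=
  PySem.Str.join "" (pvPackLoop hard_limit docs 0)

-- ===== PORT B =====
def pack_docs_for_llm_py_alt (docs : List (List (String × String))) (hard_limit : Int) : String :=
  let blocks := docs.map pvBlock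
  -- cums, t = [], 0; for b in blocks: t += len(b); cums.append(t)
  let cums := (blocks.foldl (fun (p : List Int × Int) b =>
      let t := p.2 + PySem.Str.len b
      (p.1 ++ [t], t)) ([], 0)).1
  -- cut = sum(1 for c in cums if c <= hard_limit)
  let cut := (cums.filter (fun c => c ≤ hard_limit)).length
  PySem.Str.join "" (PySem.List.slice blocks none (some (cut : Int)))

-- ===== PRECONDITION & SPEC =====
def Spec_pack_docs_for_llm_py (docs : List (List (String × String))) (hard_limit : Int) (out : String) : Prop := out = pack_docs_for_llm_py_alt docs hard_limit
instance (docs : List (List (String × String))) (hard_limit : Int) (out : String) : Decidable (Spec_pack_docs_for_llm_py docs hard_limit out) := by unfold Spec_pack_docs_for_llm_py; infer_instance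

-- ===== CLAIM (what is proved, stated in full; the proofs are below) =====
def Claim_equal_pack_docs_for_llm_py : Prop := ∀ (docs : List (List (String × String))) (hard_limit : Int), Dom_pack_docs_for_llm_py docs hard_limit → Spec_pack_docs_for_llm_py docs hard_limit (pack_docs_for_llm_py docs hard_limit)

-- ===== LEMMAS AND PROOFS =====

-- prefix sums of block lengths starting from a running total
def pvCumsFrom (total : Int) : List String → List Int
  | [] => []
  | b :: bs => (total + PySem.Str.len b) :: pvCumsFrom (total + PySem.Str.len b) bs

theorem pvLen_nonneg (s : String) : 0 ≤ PySem.Str.len s := by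
  simp [PySem.Str.len_eq]

theorem pvCumsFrom_lb (bs : List String) (total : Int) :
    ∀ c ∈ pvCumsFrom total bs, total ≤ c := by
  induction bs generalizing total with
  | nil => simp [pvCumsFrom]
  | cons b bs ih =>
    intro c hc
    have hb := pvLen_nonneg b
    simp only [pvCumsFrom, List.mem_cons] at hc
    rcases hc with h | h
    · omega
    · have := ih (total + PySem.Str.len b) c h; omega

theorem pvFoldl_cums (bs : List String) (acc : List Int) (t : Int) :
    (bs.foldl (fun (p : List Int × Int) b =>
      let t := p.2 + PySem.Str.len b
      (p.1 ++ [t], t)) (acc, t)).1 = acc ++ pvCumsFrom t bs := by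
  induction bs generalizing acc t with
  | nil => simp [pvCumsFrom]
  | cons b bs ih =>
    simp only [List.foldl_cons, pvCumsFrom]
    rw [ih]
    simp

theorem pvLoop_eq_take (hl : Int) (bs : List (List (String × String))) (total : Int) :
    pvPackLoop hl bs total =
      (bs.map pvBlock).take ((pvCumsFrom total (bs.map pvBlock)).filter (fun c => c ≤ hl)).length := by
  induction bs generalizing total with
  | nil => simp [pvPackLoop, pvCumsFrom]
  | cons d rest ih =>
    simp only [pvPackLoop, List.map_cons, pvCumsFrom]
    by_cases h : total + PySem.Str.len (pvBlock d) > hl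
    · have hfilter : ((total + PySem.Str.len (pvBlock d)) ::
          pvCumsFrom (total + PySem.Str.len (pvBlock d)) (rest.map pvBlock)).filter
          (fun c => c ≤ hl) = [] := by
        rw [List.filter_eq_nil_iff]
        intro c hc
        simp only [List.mem_cons] at hc
        simp only [decide_eq_true_eq]
        rcases hc with rfl | hc
        · omega
        · have := pvCumsFrom_lb (rest.map pvBlock) (total + PySem.Str.len (pvBlock d)) c hc
          omega
      rw [if_pos h, hfilter]
      simp
    · have hle : total + PySem.Str.len (pvBlock d) ≤ hl := by omega
      simp only [if_neg h]
      rw [List.filter_cons_of_pos (by simpa using hle)]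
      simp only [List.length_cons, List.take_succ_cons]
      rw [ih]

theorem pack_docs_eq (docs : List (List (String × String))) (hard_limit : Int) :
    pack_docs_for_llm_py docs hard_limit = pack_docs_for_llm_py_alt docs hard_limit := by
  unfold pack_docs_for_llm_py pack_docs_for_llm_py_alt
  simp only [pvFoldl_cums, List.nil_append, PySem.List.slice_to_natCast, pvLoop_eq_take]

-- ===== VERDICT (by name: the statement is the Claim_ definition above) =====
theorem pack_docs_for_llm_py_spec : Claim_equal_pack_docs_for_llm_py := by
  intro docs hard_limit _
  exact pack_docs_eq docs hard_limit
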